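-- pv_equiv track=rewrite | github.com/zhenfelix/OnlineJudgeCodings | LeetCode/356. Line Reflection/solution.py | isReflected
-- ===== SOURCE A (Python) =====
-- from typing import List
--
-- def isReflected(points: List[List[int]]) -> bool:
--     left, right = float('inf'), -float('inf')
--     seen = set()
--     for point in points:
--         x, y = point[0], point[1]
--         left = min(left,x)
--         right = max(right,x)
--         seen.add((x,y))
--     mid = (left+right)
--     for point in points:
--         x, y = point[0], point[1]
--         if (mid-x,y) not in seen:
--             return False
--     return True
-- ===== SOURCE B (Python) =====
-- def isReflected(points):
--     xs = sorted({p[0] for p in points})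
--     if not xs:
--         return True
--     mid = xs[0] + xs[-1]
--     groups = {}
--     for p in points:
--         groups.setdefault(p[1], set()).add(p[0])
--     for g in groups.values():
--         s = sorted(g)
--         if not all(a + b == mid for a, b in zip(s, reversed(s))):
--             return False
--     return True
-- ===== Notes on version B (the rewrite author's own statement) =====
-- stated objective: alternative
-- what changed: B replaces A's hash-set mirror lookup per input point with a sort-based check: it sorts the distinct x-values (mid comes from the two ends of that sorted list), groups distinct x-values by y, sorts each group and verifies opposite ends pair to mid by zipping the sorted group with its reverse — no membership probe of a mirror point anywhere.
import Mathlib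
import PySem

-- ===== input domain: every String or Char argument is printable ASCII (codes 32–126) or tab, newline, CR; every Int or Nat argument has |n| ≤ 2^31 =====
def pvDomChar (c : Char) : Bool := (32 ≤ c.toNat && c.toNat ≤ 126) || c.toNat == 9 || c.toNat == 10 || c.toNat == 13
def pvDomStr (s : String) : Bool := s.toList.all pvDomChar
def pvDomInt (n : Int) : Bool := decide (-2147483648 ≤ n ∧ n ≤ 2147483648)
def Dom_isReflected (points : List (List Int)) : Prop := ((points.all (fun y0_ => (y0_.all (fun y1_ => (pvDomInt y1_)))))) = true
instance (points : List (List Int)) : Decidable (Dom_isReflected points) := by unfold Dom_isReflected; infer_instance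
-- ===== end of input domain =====

-- B checks reflection symmetry by sorting: mid comes from the ends of the sorted distinct
-- x-list, and each y-group's sorted distinct x-values are zipped with their reverse so
-- opposite ends must pair to mid — no mirror-point membership probe; alternative algorithm.


-- ===== PORT A =====
-- float('inf') / -float('inf') are modelled as `none` in an Option Int running min/max
-- (exact here: only min/max/+ ever touch them, and `mid` is only consumed when points ≠ []).
def isReflected (points : List (List Int)) : Bool :=
  let st := points.foldl
    (fun (st : Option Int × Option Int × PySem.Set (Int × Int)) p =>
      let x := PySem.List.pyGetD p 0 0
      let y := PySem.List.pyGetD p 1 0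
      (some (match st.1 with | none => x | some m => min m x),
       some (match st.2.1 with | none => x | some m => max m x),
       PySem.Set.add st.2.2 (x, y)))
    (none, none, PySem.Set.empty)
  let mid := st.1.getD 0 + st.2.1.getD 0
  points.all (fun p =>
    let x := PySem.List.pyGetD p 0 0
    let y := PySem.List.pyGetD p 1 0
    PySem.Set.contains st.2.2 (mid - x, y))

-- ===== PORT B =====
def isReflected_alt (points : List (List Int)) : Bool :=
  let xs := PySem.List.sorted
    (PySem.Set.ofList (points.map (fun p => PySem.List.pyGetD p 0 0))) (fun x => x) false
  if xs.isEmpty then true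
  else
    let mid := PySem.List.pyGetD xs 0 0 + PySem.List.pyGetD xs (-1) 0
    let groups := points.foldl
      (fun (d : PySem.Dict Int (PySem.Set Int)) p =>
        PySem.Dict.modify d (PySem.List.pyGetD p 1 0) PySem.Set.empty
          (fun g => PySem.Set.add g (PySem.List.pyGetD p 0 0)))
      PySem.Dict.empty
    (PySem.Dict.values groups).all (fun g =>
      let s := PySem.List.sorted (g : List Int) (fun x => x) false
      (s.zip s.reverse).all (fun ab => ab.1 + ab.2 == mid))

-- ===== PRECONDITION & SPEC =====
-- Pre_: every point carries at least its two coordinates; on a shorter inner list the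
-- Python A raises IndexError (point[0]/point[1]).
def Pre_isReflected (points : List (List Int)) : Prop := ∀ p ∈ points, 2 ≤ p.length
instance (points : List (List Int)) : Decidable (Pre_isReflected points) := by unfold Pre_isReflected; infer_instance
def pvWitness_isReflected : List (List Int) := [[0, 1], [2, 1]]
def Spec_isReflected (points : List (List Int)) (out : Bool) : Prop := out = isReflected_alt points
instance (points : List (List Int)) (out : Bool) : Decidable (Spec_isReflected points out) := by unfold Spec_isReflected; infer_instance

-- ===== CLAIM (what is proved, stated in full; the proofs are below) =====
def Claim_equal_isReflected : Prop := ∀ (points : List (List Int)), Dom_isReflected points → Pre_isReflected points → Spec_isReflected points (isReflected points)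

-- ===== LEMMAS AND PROOFS =====

-- abbreviations for the proofs only
def pvX (p : List Int) : Int := PySem.List.pyGetD p 0 0
def pvY (p : List Int) : Int := PySem.List.pyGetD p 1 0
def pvGrp (l : List (List Int)) : PySem.Dict Int (PySem.Set Int) :=
  l.foldl (fun d p => PySem.Dict.modify d (pvY p) PySem.Set.empty
    (fun g => PySem.Set.add g (pvX p))) PySem.Dict.empty

-- A's componentwise fold over (left, right, seen) splits into three independent folds
theorem pvSplitA (l : List (List Int)) (a b : Option Int) (c : PySem.Set (Int × Int)) :
    List.foldl (fun (st : Option Int × Option Int × PySem.Set (Int × Int)) p =>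
        (some (match st.1 with | none => pvX p | some m => min m (pvX p)),
         some (match st.2.1 with | none => pvX p | some m => max m (pvX p)),
         PySem.Set.add st.2.2 (pvX p, pvY p))) (a, b, c) l
      = (List.foldl (fun (o : Option Int) p => some (match o with | none => pvX p | some m => min m (pvX p))) a l,
         List.foldl (fun (o : Option Int) p => some (match o with | none => pvX p | some m => max m (pvX p))) b l,
         List.foldl (fun (s : PySem.Set (Int × Int)) p => PySem.Set.add s (pvX p, pvY p)) c l) := by
  induction l generalizing a b c with
  | nil => rfl
  | cons p t ih => simp [List.foldl, ih]

theorem pvMinFoldA (l : List (List Int)) (a : Int) :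
    List.foldl (fun (o : Option Int) p => some (match o with
        | none => pvX p
        | some m => min m (pvX p))) (some a) l
      = some (List.foldl (fun m p => min m (pvX p)) a l) := by
  induction l generalizing a with
  | nil => rfl
  | cons p t ih => simpa [List.foldl] using ih (min a (pvX p))

theorem pvMaxFoldA (l : List (List Int)) (a : Int) :
    List.foldl (fun (o : Option Int) p => some (match o with
        | none => pvX p
        | some m => max m (pvX p))) (some a) l
      = some (List.foldl (fun m p => max m (pvX p)) a l) := by
  induction l generalizing a with
  | nil => rfl
  | cons p t ih => simpa [List.foldl] using ih (max a (pvX p))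

-- running minimum / maximum: membership and bound
theorem pvMinMem (l : List (List Int)) (a : Int) :
    List.foldl (fun m p => min m (pvX p)) a l ∈ a :: l.map pvX := by
  induction l generalizing a with
  | nil => simp
  | cons p t ih =>
    rw [List.foldl_cons, List.map_cons]
    rcases List.mem_cons.mp (ih (min a (pvX p))) with he | he
    · rcases min_choice a (pvX p) with h' | h'
      · rw [he, h']; exact List.mem_cons_self
      · rw [he, h']; exact List.mem_cons_of_mem _ List.mem_cons_self
    · exact List.mem_cons_of_mem _ (List.mem_cons_of_mem _ he)

theorem pvMinLe (l : List (List Int)) (a : Int) :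
    ∀ y ∈ a :: l.map pvX, List.foldl (fun m p => min m (pvX p)) a l ≤ y := by
  induction l generalizing a with
  | nil => intro y hy; simp at hy; simp [hy]
  | cons p t ih =>
    intro y hy
    rw [List.foldl_cons]
    rw [List.map_cons] at hy
    rcases List.mem_cons.mp hy with h1 | hy
    · rw [h1]; exact le_trans (ih (min a (pvX p)) _ List.mem_cons_self) (min_le_left _ _)
    · rcases List.mem_cons.mp hy with h1 | hy
      · rw [h1]; exact le_trans (ih (min a (pvX p)) _ List.mem_cons_self) (min_le_right _ _)
      · exact ih (min a (pvX p)) _ (List.mem_cons_of_mem _ hy)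

theorem pvMaxMem (l : List (List Int)) (a : Int) :
    List.foldl (fun m p => max m (pvX p)) a l ∈ a :: l.map pvX := by
  induction l generalizing a with
  | nil => simp
  | cons p t ih =>
    rw [List.foldl_cons, List.map_cons]
    rcases List.mem_cons.mp (ih (max a (pvX p))) with he | he
    · rcases max_choice a (pvX p) with h' | h'
      · rw [he, h']; exact List.mem_cons_self
      · rw [he, h']; exact List.mem_cons_of_mem _ List.mem_cons_self
    · exact List.mem_cons_of_mem _ (List.mem_cons_of_mem _ he)

theorem pvMaxGe (l : List (List Int)) (a : Int) :
    ∀ y ∈ a :: l.map pvX, y ≤ List.foldl (fun m p => max m (pvX p)) a l := by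
  induction l generalizing a with
  | nil => intro y hy; simp at hy; simp [hy]
  | cons p t ih =>
    intro y hy
    rw [List.foldl_cons]
    rw [List.map_cons] at hy
    rcases List.mem_cons.mp hy with h1 | hy
    · rw [h1]; exact le_trans (le_max_left _ _) (ih (max a (pvX p)) _ List.mem_cons_self)
    · rcases List.mem_cons.mp hy with h1 | hy
      · rw [h1]; exact le_trans (le_max_right _ _) (ih (max a (pvX p)) _ List.mem_cons_self)
      · exact ih (max a (pvX p)) _ (List.mem_cons_of_mem _ hy)

-- membership in the per-y group built by B's grouping fold
theorem pvMemGroup (l : List (List Int)) (d : PySem.Dict Int (PySem.Set Int)) (x y : Int) :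
    (x ∈ (List.foldl (fun (d : PySem.Dict Int (PySem.Set Int)) p =>
        PySem.Dict.modify d (pvY p) PySem.Set.empty
          (fun g => PySem.Set.add g (pvX p))) d l).getD y PySem.Set.empty)
      ↔ x ∈ d.getD y PySem.Set.empty ∨ ∃ p ∈ l, x = pvX p ∧ y = pvY p := by
  induction l generalizing d with
  | nil => simp [List.foldl]
  | cons p t ih =>
    simp only [List.foldl, ih, PySem.Dict.getD_modify, List.mem_cons]
    by_cases h : y = pvY p
    · simp [h, PySem.Set.mem_add]
      tauto
    · simp [h]

-- the keys of B's grouping fold are exactly the y-coordinates seen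
theorem pvMemKeysGroup (l : List (List Int)) (d : PySem.Dict Int (PySem.Set Int)) (y : Int) :
    (y ∈ (List.foldl (fun (d : PySem.Dict Int (PySem.Set Int)) p =>
        PySem.Dict.modify d (pvY p) PySem.Set.empty
          (fun g => PySem.Set.add g (pvX p))) d l).keys)
      ↔ y ∈ d.keys ∨ ∃ p ∈ l, y = pvY p := by
  induction l generalizing d with
  | nil => simp [List.foldl]
  | cons p t ih =>
    simp only [List.foldl, ih, PySem.Dict.keys_modify, List.mem_cons]
    simp only [PySem.Dict.mem_keys_insert]
    constructor
    · rintro ((rfl | h) | ⟨q, hq, rfl⟩)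
      · exact Or.inr ⟨p, Or.inl rfl, rfl⟩
      · exact Or.inl h
      · exact Or.inr ⟨q, Or.inr hq, rfl⟩
    · rintro (h | ⟨q, (rfl | hq), rfl⟩)
      · exact Or.inl (Or.inr h)
      · exact Or.inl (Or.inl rfl)
      · exact Or.inr ⟨q, hq, rfl⟩

theorem pvNodupKeysGroup (l : List (List Int)) :
    (pvGrp l).keys.Nodup := by
  exact PySem.Dict.nodup_keys_foldl_modify_key l pvY _ _ PySem.Dict.empty (by simp)

-- every group value is duplicate-free (it is built with Set.add from the empty set)
theorem pvNodupGroup (l : List (List Int)) (d : PySem.Dict Int (PySem.Set Int))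
    (h : ∀ y, (d.getD y PySem.Set.empty).Nodup) (y : Int) :
    ((List.foldl (fun (d : PySem.Dict Int (PySem.Set Int)) p =>
        PySem.Dict.modify d (pvY p) PySem.Set.empty
          (fun g => PySem.Set.add g (pvX p))) d l).getD y PySem.Set.empty).Nodup := by
  induction l generalizing d with
  | nil => exact h y
  | cons p t ih =>
    refine ih _ (fun y' => ?_)
    rw [PySem.Dict.getD_modify]
    by_cases hy : y' = pvY p
    · rw [hy, if_pos rfl]
      exact PySem.Set.nodup_add _ _ (h _)
    · simp only [if_neg hy]; exact h y'

-- the crux: on a duplicate-free group, the zip-with-reverse pairing over the sorted list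
-- succeeds iff the group is closed under x ↦ mid - x
theorem pvZipSym (G : List Int) (hnd : G.Nodup) (mid : Int) :
    (∀ ab ∈ (PySem.List.sorted G (fun x => x) false).zip
        (PySem.List.sorted G (fun x => x) false).reverse, (ab.1 + ab.2 == mid) = true)
      ↔ ∀ x ∈ G, (mid - x) ∈ G := by
  have hperm : (PySem.List.sorted G (fun x => x) false).Perm G := PySem.List.sorted_perm G _ false
  have hle : (PySem.List.sorted G (fun x => x) false).Pairwise (fun a b => a ≤ b) :=
    PySem.List.sorted_pairwise G (fun x => x)
  set s := PySem.List.sorted G (fun x => x) false with hs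
  have hndS : s.Nodup := (List.Perm.nodup_iff hperm).mpr hnd
  have hlt : s.Pairwise (· < ·) := by
    have hne : s.Pairwise (· ≠ ·) := hndS
    exact (hle.and hne).imp (fun h => lt_of_le_of_ne h.1 h.2)
  have hidx : (∀ ab ∈ s.zip s.reverse, (ab.1 + ab.2 == mid) = true)
      ↔ ∀ i, (hi : i < s.length) → s[i] + s[s.length - 1 - i] = mid := by
    constructor
    · intro h i hi
      have hiz : i < (s.zip s.reverse).length := by
        simpa [List.length_zip] using hi
      have hz := h _ (List.getElem_mem hiz)
      rw [List.getElem_zip] at hz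
      simp only [beq_iff_eq] at hz
      rw [List.getElem_reverse] at hz
      exact hz
    · intro h ab hab
      obtain ⟨i, hi, rfl⟩ := List.mem_iff_getElem.mp hab
      have hi2 : i < s.length := by simpa [List.length_zip] using hi
      rw [List.getElem_zip]
      simp only [beq_iff_eq]
      rw [List.getElem_reverse]
      exact h i hi2
  rw [hidx]
  constructor
  · intro h x hx
    obtain ⟨i, hi, rfl⟩ := List.mem_iff_getElem.mp ((List.Perm.mem_iff hperm).mpr hx)
    have h1 := h i hi
    have h2 : mid - s[i] = s[s.length - 1 - i] := by omega
    rw [h2]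
    exact (List.Perm.mem_iff hperm).mp (List.getElem_mem _)
  · intro hcl i hi
    have hsub : (s.reverse.map (fun x => mid - x)) ⊆ s := by
      intro z hz
      obtain ⟨x, hx, rfl⟩ := List.mem_map.mp hz
      have hxG : x ∈ G := (List.Perm.mem_iff hperm).mp (List.mem_reverse.mp hx)
      exact (List.Perm.mem_iff hperm).mpr (hcl x hxG)
    have hndt : (s.reverse.map (fun x => mid - x)).Nodup :=
      List.Nodup.map (fun a b hab => by omega) (List.nodup_reverse.mpr hndS)
    have hpt : (s.reverse.map (fun x => mid - x)).Perm s :=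
      (List.subperm_of_subset hndt hsub).perm_of_length_le (by simp)
    have hltt : (s.reverse.map (fun x => mid - x)).Pairwise (· < ·) := by
      have h1 : s.reverse.Pairwise (fun a b => b < a) := List.pairwise_reverse.mpr hlt
      exact List.Pairwise.map _ (fun a b hab => by omega) h1
    have heq : s.reverse.map (fun x => mid - x) = s :=
      List.Perm.eq_of_pairwise (fun a b _ _ h1 h2 => absurd h2 (lt_asymm h1)) hltt hlt hpt
    have hi1 : i < (s.reverse.map (fun x => mid - x)).length := by simpa using hi
    have h2 : (s.reverse.map (fun x => mid - x))[i]'hi1 = s[i]'hi := by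
      simp only [heq]
    have h3 : (s.reverse.map (fun x => mid - x))[i]'hi1 = mid - s[s.length - 1 - i]'(by omega) := by
      rw [List.getElem_map, List.getElem_reverse]
    omega

-- the main bridge, at a fixed mid: A's mirror check over the flat pair set equals
-- B's per-group sorted pairing check
theorem pvFinal (l : List (List Int)) (mid : Int) :
    (l.all fun p =>
        (List.foldl (fun (s : PySem.Set (Int × Int)) p =>
            PySem.Set.add s (pvX p, pvY p)) PySem.Set.empty l).contains
          (mid - pvX p, pvY p))
      = ((pvGrp l).values.all
          fun g =>
            ((PySem.List.sorted (g : List Int) (fun x => x) false).zip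
              (PySem.List.sorted (g : List Int) (fun x => x) false).reverse).all
              (fun ab => ab.1 + ab.2 == mid)) := by
  apply Bool.eq_iff_iff.mpr
  have hnd := pvNodupKeysGroup l
  rw [PySem.Dict.values_eq_map_keys _ hnd PySem.Set.empty]
  simp only [List.all_eq_true, List.mem_map, PySem.Set.contains_iff, PySem.Set.mem_foldl_add,
    forall_exists_index, and_imp]
  constructor
  · intro hA g k hk hg
    subst hg
    refine (pvZipSym _ (pvNodupGroup l PySem.Dict.empty (by simp) k) mid).mpr ?_
    intro x hx
    rcases (pvMemGroup l PySem.Dict.empty x k).mp hx with h | ⟨p, hp, rfl, rfl⟩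
    · simp at h
    · rcases hA p hp with h | ⟨q, hq, hq2⟩
      · simp at h
      · have hy' : pvY p = pvY q := congrArg Prod.snd hq2
        have hx1 : mid - pvX p = pvX q := congrArg Prod.fst hq2
        exact (pvMemGroup l PySem.Dict.empty _ _).mpr (Or.inr ⟨q, hq, hx1.symm ▸ rfl, hy'⟩)
  · intro hB p hp
    have hk : pvY p ∈ (pvGrp l).keys :=
      (pvMemKeysGroup l PySem.Dict.empty _).mpr (Or.inr ⟨p, hp, rfl⟩)
    have hx : pvX p ∈ (pvGrp l).getD (pvY p) PySem.Set.empty :=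
      (pvMemGroup l PySem.Dict.empty _ _).mpr (Or.inr ⟨p, hp, rfl, rfl⟩)
    have hcl := (pvZipSym _ (pvNodupGroup l PySem.Dict.empty (by simp) (pvY p)) mid).mp
      (hB _ _ hk rfl)
    have := hcl _ hx
    rcases (pvMemGroup l PySem.Dict.empty _ _).mp this with h | ⟨q, hq, h1, h2⟩
    · simp at h
    · exact Or.inr ⟨q, hq, by rw [h1, h2]⟩

theorem pvX_def (p : List Int) : PySem.List.pyGetD p 0 0 = pvX p := rfl
theorem pvY_def (p : List Int) : PySem.List.pyGetD p 1 0 = pvY p := rfl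

-- the sorted distinct x-list of a nonempty input is nonempty
theorem pvSortNe (p0 : List Int) (rest : List (List Int)) :
    PySem.List.sorted (PySem.Set.ofList ((p0 :: rest).map pvX)) (fun x => x) false ≠ [] := by
  rw [Ne, PySem.List.sorted_eq_nil_iff]
  intro h
  have hm : pvX p0 ∈ PySem.Set.ofList ((p0 :: rest).map pvX) :=
    (PySem.Set.mem_ofList _ _).mpr (by simp)
  rw [h] at hm; simp at hm

-- its first element is A's running minimum
theorem pvHead (p0 : List Int) (rest : List (List Int)) :
    pvX (PySem.List.sorted (PySem.Set.ofList ((p0 :: rest).map pvX)) (fun x => x) false)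
      = List.foldl (fun m p => min m (pvX p)) (pvX p0) rest := by
  conv_lhs => rw [← pvX_def]
  obtain ⟨m, t, hxs⟩ := List.exists_cons_of_ne_nil (pvSortNe p0 rest)
  rw [hxs, PySem.List.pyGetD_zero_cons]
  have hmle := PySem.List.key_head_sorted_le _ (fun x => x) hxs
  have hmmem : m ∈ (p0 :: rest).map pvX := by
    have h1 : m ∈ PySem.List.sorted (PySem.Set.ofList ((p0 :: rest).map pvX)) (fun x => x) false := by
      rw [hxs]; exact List.mem_cons_self
    exact (PySem.Set.mem_ofList _ _).mp ((PySem.List.mem_sorted _ _ _ _).mp h1)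
  have h1 : m ≤ List.foldl (fun m p => min m (pvX p)) (pvX p0) rest := by
    apply hmle
    exact (PySem.Set.mem_ofList _ _).mpr (by simpa using pvMinMem rest (pvX p0))
  have h2 := pvMinLe rest (pvX p0) m (by simpa using hmmem)
  omega

-- its last element is A's running maximum
theorem pvLast (p0 : List Int) (rest : List (List Int)) :
    PySem.List.pyGetD (PySem.List.sorted (PySem.Set.ofList ((p0 :: rest).map pvX)) (fun x => x) false) (-1) 0
      = List.foldl (fun m p => max m (pvX p)) (pvX p0) rest := by
  have hne := pvSortNe p0 rest
  rw [PySem.List.pyGetD_neg_one _ _ hne]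
  have hlen : 0 < (PySem.List.sorted (PySem.Set.ofList ((p0 :: rest).map pvX)) (fun x => x) false).length :=
    List.length_pos_of_ne_nil hne
  have hlast_mem : (PySem.List.sorted (PySem.Set.ofList ((p0 :: rest).map pvX)) (fun x => x) false).getLast hne
      ∈ (p0 :: rest).map pvX :=
    (PySem.Set.mem_ofList _ _).mp ((PySem.List.mem_sorted _ _ _ _).mp (List.getLast_mem hne))
  have h1 := pvMaxGe rest (pvX p0)
    ((PySem.List.sorted (PySem.Set.ofList ((p0 :: rest).map pvX)) (fun x => x) false).getLast hne)
    (by simpa using hlast_mem)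
  have h2 : List.foldl (fun m p => max m (pvX p)) (pvX p0) rest
      ≤ (PySem.List.sorted (PySem.Set.ofList ((p0 :: rest).map pvX)) (fun x => x) false).getLast hne := by
    have hmem2 : List.foldl (fun m p => max m (pvX p)) (pvX p0) rest
        ∈ PySem.List.sorted (PySem.Set.ofList ((p0 :: rest).map pvX)) (fun x => x) false :=
      (PySem.List.mem_sorted _ _ _ _).mpr
        ((PySem.Set.mem_ofList _ _).mpr (by simpa using pvMaxMem rest (pvX p0)))
    obtain ⟨i, hi, hEq⟩ := List.mem_iff_getElem.mp hmem2
    rw [List.getLast_eq_getElem, ← hEq]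
    exact PySem.List.sorted_id_getElem_mono _ (by omega) (by omega)
  omega

theorem pvMain (points : List (List Int)) : isReflected points = isReflected_alt points := by
  cases points with
  | nil => rfl
  | cons p0 rest =>
    simp only [isReflected, isReflected_alt, pvX_def, pvY_def]
    rw [pvSplitA]
    simp only [List.foldl_cons]
    rw [pvMinFoldA rest (pvX p0), pvMaxFoldA rest (pvX p0)]
    simp only [Option.getD_some]
    have hne := pvSortNe p0 rest
    rw [List.isEmpty_eq_false_iff.mpr hne]
    simp only [Bool.false_eq_true, if_false]
    rw [pvHead p0 rest, pvLast p0 rest]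
    exact pvFinal (p0 :: rest) _

-- ===== VERDICT (by name: the statement is the Claim_ definition above) =====
theorem isReflected_spec : Claim_equal_isReflected := by
  intro points _ _
  unfold Spec_isReflected
  exact pvMain points
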